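-- pv_equiv track=rewrite | github.com/mablin7/nitroplast | experiments/utp_consensus_structure/05_analyze_individual_structures.py | smooth_ss
-- ===== SOURCE A (Python) =====
-- def smooth_ss(ss_list, min_length=3):
--     """Smooth secondary structure by requiring minimum helix/strand length."""
--     result = list(ss_list)
--     n = len(result)
--
--     # Convert short helices to coil
--     i = 0
--     while i < n:
--         if result[i] in ["H", "G"]:
--             j = i
--             while j < n and result[j] in ["H", "G"]:
--                 j += 1
--             if j - i < min_length:
--                 for k in range(i, j):
--                     result[k] = "C"
--             i = j
--         else:
--             i += 1
--
--     return result
-- ===== SOURCE B (Python) =====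
-- def smooth_ss(ss_list, min_length=3):
--     """Smooth secondary structure by requiring minimum helix/strand length."""
--     # Phase 1: run-length group the sequence by "is helix" in one forward pass.
--     groups = []
--     for x in ss_list:
--         k = x in ("H", "G")
--         if groups and groups[-1][0] == k:
--             groups[-1][1].append(x)
--         else:
--             groups.append((k, [x]))
--     # Phase 2: emit each group, turning short helix runs into coil.
--     out = []
--     for k, g in groups:
--         if k and len(g) < min_length:
--             out.extend(["C"] * len(g))
--         else:
--             out.extend(g)
--     return out
-- ===== Notes on version B (the rewrite author's own statement) =====
-- stated objective: alternative
-- what changed: A mutates a copy in place with an index-driven outer while loop and an inner run-scanning while loop; B instead makes one forward pass that run-length groups the sequence into (is_helix, run) groups and then a second pass that emits each group, replacing short helix runs by coil.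
import Mathlib
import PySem

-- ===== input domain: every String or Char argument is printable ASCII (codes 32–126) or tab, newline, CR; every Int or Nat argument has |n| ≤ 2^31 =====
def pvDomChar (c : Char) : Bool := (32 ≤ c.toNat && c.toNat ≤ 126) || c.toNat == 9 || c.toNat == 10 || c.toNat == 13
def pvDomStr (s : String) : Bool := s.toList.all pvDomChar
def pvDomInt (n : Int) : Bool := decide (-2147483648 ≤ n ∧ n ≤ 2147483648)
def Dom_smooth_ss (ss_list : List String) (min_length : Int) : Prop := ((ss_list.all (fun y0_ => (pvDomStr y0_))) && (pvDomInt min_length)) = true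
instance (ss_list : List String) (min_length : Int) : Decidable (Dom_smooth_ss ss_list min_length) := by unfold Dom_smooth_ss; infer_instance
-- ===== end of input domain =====

-- B replaces A's in-place index/while-loop smoothing by a run-length-group pass plus an emit pass (alternative decomposition, same cost).
-- A mutates only its own copy of ss_list; neither version mutates the caller's list.

-- ===== PORT A =====

-- `x in ["H","G"]`
def pvHelix (s : String) : Bool := s == "H" || s == "G"

-- inner `while j < n and result[j] in ["H","G"]: j += 1` (reads are always in range, so getD is exact)
def pvScanJ (result : List String) (n j : Nat) : Nat :=
  if h : j < n ∧ pvHelix (result.getD j "") then pvScanJ result n (j + 1) else j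
termination_by n - j
decreasing_by omega

-- `for k in range(i, j): result[k] = "C"`
def pvSetRange (result : List String) (i j : Int) : List String :=
  (PySem.List.pyRange i j 1).foldl (fun r k => PySem.List.pySetD r k "C") result

-- outer `while i < n` loop; each iteration advances i by at least 1, so n steps of fuel reproduce it exactly
def pvOuterA (m : Int) (result : List String) (n i fuel : Nat) : List String :=
  match fuel with
  | 0 => result
  | fuel + 1 =>
    if i < n then
      if pvHelix (result.getD i "") then
        let j := pvScanJ result n i
        if (j : Int) - (i : Int) < m then pvOuterA m (pvSetRange result i j) n j fuel
        else pvOuterA m result n j fuel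
      else pvOuterA m result n (i + 1) fuel
    else result

def smooth_ss (ss_list : List String) (min_length : Int) : List String :=
  pvOuterA min_length ss_list ss_list.length 0 ss_list.length

-- ===== PORT B =====

-- one step of B's first pass: extend the last group or start a new one
def pvAddGroup (groups : List (Bool × List String)) (x : String) : List (Bool × List String) :=
  let k := pvHelix x
  match groups.getLast? with
  | some (k', g) => if k' == k then groups.dropLast ++ [(k', g ++ [x])] else groups ++ [(k, [x])]
  | none => [(k, [x])]

-- B's second pass: emit each group, short helix runs become coil
def pvEmit (m : Int) (gs : List (Bool × List String)) : List String :=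
  gs.foldl (fun out kg =>
    out ++ (if kg.1 && (kg.2.length : Int) < m then List.replicate kg.2.length "C" else kg.2)) []

def smooth_ss_alt (ss_list : List String) (min_length : Int) : List String :=
  pvEmit min_length (ss_list.foldl pvAddGroup [])

-- ===== PRECONDITION & SPEC =====
def Spec_smooth_ss (ss_list : List String) (min_length : Int) (out : List String) : Prop := out = smooth_ss_alt ss_list min_length
instance (ss_list : List String) (min_length : Int) (out : List String) : Decidable (Spec_smooth_ss ss_list min_length out) := by unfold Spec_smooth_ss; infer_instance

-- ===== CLAIM (what is proved, stated in full; the proofs are below) =====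
def Claim_equal_smooth_ss : Prop := ∀ (ss_list : List String) (min_length : Int), Dom_smooth_ss ss_list min_length → Spec_smooth_ss ss_list min_length (smooth_ss ss_list min_length)

-- ===== LEMMAS AND PROOFS =====

-- common reference function: process maximal helix runs front to back
def pvGo (m : Int) : List String → List String
  | [] => []
  | x :: xs =>
    ((if pvHelix x then
      (if ((xs.takeWhile pvHelix).length + 1 : Int) < m
        then List.replicate ((xs.takeWhile pvHelix).length + 1) "C"
        else x :: xs.takeWhile pvHelix) ++ pvGo m (xs.dropWhile pvHelix)
    else x :: pvGo m xs))
termination_by l => l.length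
decreasing_by
  · simpa using Nat.lt_succ_of_le (xs.length_dropWhile_le pvHelix)
  · simp

theorem pvScanJ_spec (result : List String) (j : Nat) :
    pvScanJ result result.length j = j + ((result.drop j).takeWhile pvHelix).length := by
  by_cases hj : j < result.length
  · rw [List.drop_eq_getElem_cons hj]
    by_cases hx : pvHelix result[j]
    · rw [pvScanJ]
      simp only [List.getD_eq_getElem?_getD, List.getElem?_eq_getElem hj, Option.getD_some]
      rw [dif_pos ⟨hj, hx⟩, pvScanJ_spec result (j + 1), List.takeWhile_cons, if_pos hx]
      simp
      omega
    · rw [pvScanJ]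
      simp only [List.getD_eq_getElem?_getD, List.getElem?_eq_getElem hj, Option.getD_some]
      rw [dif_neg (by simp [hx]), List.takeWhile_cons, if_neg hx]
      simp
  · rw [pvScanJ, dif_neg (by omega), List.drop_eq_nil_of_le (by omega)]
    simp
termination_by result.length - j
decreasing_by omega

theorem pvSetRange_spec (result : List String) (i j : Nat) (hij : i ≤ j) (hj : j ≤ result.length) :
    pvSetRange result i j = result.take i ++ List.replicate (j - i) "C" ++ result.drop j := by
  by_cases h : i < j
  · have hi : i < result.length := by omega
    have hset : PySem.List.pySetD result (i : Int) "C" = result.set i "C" := by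
      simp [PySem.List.pySetD_natCast]
    have hstep : pvSetRange result i j
        = pvSetRange (result.set i "C") ((i + 1 : Nat) : Int) ((j : Nat) : Int) := by
      rw [pvSetRange, PySem.List.pyRange_one_cons (show (i : Int) < (j : Int) by exact_mod_cast h),
        List.foldl_cons, hset, pvSetRange, show ((i : Int) + 1) = ((i + 1 : Nat) : Int) by push_cast; ring]
    rw [hstep, pvSetRange_spec (result.set i "C") (i + 1) j (by omega) (by simpa using hj)]
    have hsplit : result.set i "C" = (result.take i ++ ["C"]) ++ result.drop (i + 1) := by
      rw [List.set_eq_take_append_cons_drop, if_pos hi]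
      simp
    have hA : (result.set i "C").take (i + 1) = result.take i ++ ["C"] := by
      rw [hsplit]
      exact List.take_left' (by simp; omega)
    have hB : (result.set i "C").drop j = result.drop j := by
      rw [hsplit, List.drop_append, List.drop_eq_nil_of_le (by simp; omega), List.drop_drop]
      simp only [List.nil_append]
      congr 1
      simp
      omega
    rw [hA, hB, show j - i = (j - (i + 1)) + 1 by omega, List.replicate_succ]
    simp
  · have hji : j = i := by omega
    subst hji
    rw [pvSetRange, PySem.List.pyRange_one_eq_nil (by omega)]
    simp
termination_by j - i
decreasing_by omega

theorem pvTake_takeWhile (l : List String) (p : String → Bool) :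
    l.take (l.takeWhile p).length = l.takeWhile p := by
  have h := List.take_left (l₁ := l.takeWhile p) (l₂ := l.dropWhile p)
  rwa [List.takeWhile_append_dropWhile] at h

theorem pvOuterA_spec (m : Int) : ∀ (fuel : Nat) (result : List String) (i : Nat),
    result.length ≤ i + fuel →
    pvOuterA m result result.length i fuel = result.take i ++ pvGo m (result.drop i) := by
  intro fuel
  induction fuel with
  | zero =>
    intro result i hf
    rw [pvOuterA, List.take_of_length_le (by omega), List.drop_eq_nil_of_le (by omega), pvGo]
    simp
  | succ fuel ih =>
    intro result i hf
    by_cases hi : i < result.length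
    · have hdrop : result.drop i = result[i] :: result.drop (i + 1) := List.drop_eq_getElem_cons hi
      have hgetD : result.getD i "" = result[i] := by
        simp [List.getD_eq_getElem?_getD, List.getElem?_eq_getElem hi]
      by_cases hx : pvHelix result[i]
      · -- helix run starting at i
        set t := ((result.drop (i + 1)).takeWhile pvHelix).length with ht
        have hrun : (result.drop i).takeWhile pvHelix
            = result[i] :: (result.drop (i + 1)).takeWhile pvHelix := by
          rw [hdrop, List.takeWhile_cons, if_pos hx]
        have hscan : pvScanJ result result.length i = i + (t + 1) := by
          rw [pvScanJ_spec, hrun]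
          simp [ht]
        have htle : t + 1 ≤ result.length - i := by
          have h5 := (List.takeWhile_sublist (l := result.drop i) (p := pvHelix)).length_le
          rw [hrun] at h5
          simp at h5
          omega
        have hlen : ((result.drop i).takeWhile pvHelix).length = t + 1 := by
          rw [hrun]
          simp [ht]
        have h2 : (result.drop i).drop (t + 1) = (result.drop i).dropWhile pvHelix := by
          conv_lhs => rw [← List.takeWhile_append_dropWhile (p := pvHelix) (l := result.drop i)]
          exact List.drop_left' hlen
        have hdw : (result.drop i).dropWhile pvHelix = result.drop (i + (t + 1)) := by
          rw [← h2, List.drop_drop]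
        have hdw1 : (result.drop (i + 1)).dropWhile pvHelix = result.drop (i + (t + 1)) := by
          rw [← hdw, hdrop, List.dropWhile_cons, if_pos hx]
        rw [pvOuterA, if_pos hi, hgetD, if_pos hx]
        simp only [hscan]
        have hcond : ((i + (t + 1) : Nat) : Int) - ((i : Nat) : Int) = ((t : Int) + 1) := by
          push_cast
          ring
        by_cases hm : ((t : Int) + 1) < m
        · rw [if_pos (by rw [hcond]; exact hm)]
          have hsp : pvSetRange result (i : Int) ((i + (t + 1) : Nat) : Int)
              = result.take i ++ List.replicate (t + 1) "C" ++ result.drop (i + (t + 1)) := by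
            rw [pvSetRange_spec result i (i + (t + 1)) (by omega) (by omega),
              show i + (t + 1) - i = t + 1 by omega]
          rw [hsp]
          set result' := result.take i ++ List.replicate (t + 1) "C" ++ result.drop (i + (t + 1)) with hr'
          have hpre : (result.take i ++ List.replicate (t + 1) "C").length = i + (t + 1) := by
            simp
            omega
          have hlen' : result'.length = result.length := by
            rw [hr']
            simp
            omega
          rw [← hlen', ih result' (i + (t + 1)) (by rw [hlen']; omega)]
          have htk' : result'.take (i + (t + 1)) = result.take i ++ List.replicate (t + 1) "C" := by
            rw [hr', List.append_assoc, ← List.append_assoc]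
            exact List.take_left' hpre
          have hdr' : result'.drop (i + (t + 1)) = result.drop (i + (t + 1)) := by
            rw [hr', List.append_assoc, ← List.append_assoc]
            exact List.drop_left' hpre
          rw [htk', hdr', hdrop, pvGo, if_pos hx, if_pos (by rw [← ht]; exact hm), hdw1]
          simp [ht]
        · rw [if_neg (by rw [hcond]; exact hm)]
          rw [ih result (i + (t + 1)) (by omega)]
          rw [show result.take (i + (t + 1)) = result.take i ++ (result.drop i).take (t + 1) from
            List.take_add ..]
          have htw : (result.drop i).take (t + 1) = (result.drop i).takeWhile pvHelix := by
            have h6 := pvTake_takeWhile (result.drop i) pvHelix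
            rwa [hlen] at h6
          rw [htw, hrun, hdrop, pvGo, if_pos hx, if_neg (by rw [← ht]; exact hm), hdw1]
          simp
      · rw [pvOuterA, if_pos hi, hgetD, if_neg hx, ih result (i + 1) (by omega),
          hdrop, pvGo, if_neg hx, List.take_add_one, List.getElem?_eq_getElem hi]
        simp only [Option.toList_some, List.append_assoc, List.singleton_append]
    · rw [pvOuterA, if_neg hi, List.take_of_length_le (by omega),
        List.drop_eq_nil_of_le (by omega), pvGo]
      simp

-- B-side: one grouping step never yields the empty group list
theorem pvAddGroup_ne_nil (gs : List (Bool × List String)) (x : String) : pvAddGroup gs x ≠ [] := by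
  rw [pvAddGroup]
  cases h : gs.getLast? with
  | none => simp
  | some kg =>
    obtain ⟨k', g⟩ := kg
    by_cases he : k' == pvHelix x
    · simp [he]
    · simp [he]

-- B-side: the grouping step only ever touches the last group
theorem pvAddGroup_shift (x : String) (ds gs : List (Bool × List String)) (hgs : gs ≠ []) :
    pvAddGroup (ds ++ gs) x = ds ++ pvAddGroup gs x := by
  rw [pvAddGroup, pvAddGroup, List.getLast?_append_of_ne_nil _ hgs]
  cases h : gs.getLast? with
  | none => exact absurd (List.getLast?_eq_none_iff.mp h) hgs
  | some kg =>
    obtain ⟨k', g⟩ := kg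
    by_cases he : k' == pvHelix x
    · simp [he, List.dropLast_append_of_ne_nil hgs, List.append_assoc]
    · simp [he, List.append_assoc]

theorem pvFoldl_shift : ∀ (xs : List String) (ds gs : List (Bool × List String)), gs ≠ [] →
    xs.foldl pvAddGroup (ds ++ gs) = ds ++ xs.foldl pvAddGroup gs := by
  intro xs
  induction xs with
  | nil =>
    intro ds gs h
    simp
  | cons x xs ih =>
    intro ds gs h
    rw [List.foldl_cons, List.foldl_cons, pvAddGroup_shift x ds gs h,
      ih ds _ (pvAddGroup_ne_nil gs x)]

theorem pvFoldl_single : ∀ (xs : List String) (k : Bool) (g : List String), g ≠ [] →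
    xs.foldl pvAddGroup [(k, g)]
      = (k, g ++ xs.takeWhile (fun y => pvHelix y == k))
        :: (xs.dropWhile (fun y => pvHelix y == k)).foldl pvAddGroup [] := by
  intro xs
  induction xs with
  | nil =>
    intro k g hg
    simp
  | cons x xs ih =>
    intro k g hg
    rw [List.foldl_cons, pvAddGroup]
    simp only [List.getLast?_singleton]
    by_cases he : pvHelix x == k
    · have he' : k == pvHelix x := by
        cases k <;> cases hh : pvHelix x <;> simp_all
      rw [if_pos he']
      simp only [List.dropLast_singleton, List.nil_append]
      rw [ih k (g ++ [x]) (by simp)]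
      rw [List.takeWhile_cons, if_pos he, List.dropWhile_cons, if_pos he]
      simp
    · have he' : ¬(k == pvHelix x) = true := by
        cases k <;> cases hh : pvHelix x <;> simp_all
      rw [if_neg he']
      rw [pvFoldl_shift xs [(k, g)] [(pvHelix x, [x])] (by simp)]
      rw [List.takeWhile_cons, if_neg he, List.dropWhile_cons, if_neg he]
      rw [List.foldl_cons, show pvAddGroup [] x = [(pvHelix x, [x])] from rfl]
      simp

theorem pvFoldl_out (f : (Bool × List String) → List String) :
    ∀ (gs : List (Bool × List String)) (acc : List String),
    gs.foldl (fun out kg => out ++ f kg) acc = acc ++ gs.flatMap f := by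
  intro gs
  induction gs with
  | nil =>
    intro acc
    simp
  | cons g gs ih =>
    intro acc
    rw [List.foldl_cons, ih]
    simp

theorem pvEmit_eq_flatMap (m : Int) (gs : List (Bool × List String)) :
    pvEmit m gs = gs.flatMap (fun kg =>
      if kg.1 && (kg.2.length : Int) < m then List.replicate kg.2.length "C" else kg.2) := by
  rw [pvEmit]
  simpa using pvFoldl_out
    (fun kg => if kg.1 && (kg.2.length : Int) < m then List.replicate kg.2.length "C" else kg.2) gs []

-- pvGo passes a maximal non-helix run through unchanged
theorem pvGo_nonhelix_run (m : Int) : ∀ (xs : List String),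
    pvGo m xs = xs.takeWhile (fun y => !pvHelix y) ++ pvGo m (xs.dropWhile (fun y => !pvHelix y)) := by
  intro xs
  induction xs with
  | nil => simp
  | cons x xs ih =>
    by_cases hx : pvHelix x
    · rw [List.takeWhile_cons, if_neg (by simp [hx]), List.dropWhile_cons, if_neg (by simp [hx])]
      simp
    · rw [List.takeWhile_cons, if_pos (by simp [hx]), List.dropWhile_cons, if_pos (by simp [hx])]
      rw [pvGo, if_neg hx, ih]
      simp

theorem pvB_eq_pvGo (m : Int) : ∀ (N : Nat) (xs : List String), xs.length ≤ N →
    pvEmit m (xs.foldl pvAddGroup []) = pvGo m xs := by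
  intro N
  induction N with
  | zero =>
    intro xs h
    cases xs with
    | nil => simp [pvEmit, pvGo]
    | cons x xs => simp at h
  | succ N ih =>
    intro xs h
    cases xs with
    | nil => simp [pvEmit, pvGo]
    | cons x xs =>
      rw [List.foldl_cons, show pvAddGroup [] x = [(pvHelix x, [x])] from rfl,
        pvFoldl_single xs (pvHelix x) [x] (by simp),
        pvEmit_eq_flatMap, List.flatMap_cons, ← pvEmit_eq_flatMap]
      by_cases hx : pvHelix x
      · rw [show (fun y => pvHelix y == pvHelix x) = pvHelix from by funext y; rw [hx]; simp]
        rw [ih (xs.dropWhile pvHelix)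
          (by have := xs.length_dropWhile_le pvHelix; simp at h; omega)]
        rw [pvGo, if_pos hx]
        by_cases hm : ((xs.takeWhile pvHelix).length : Int) + 1 < m
        · rw [if_pos (by simp [hx]; omega), if_pos (by exact_mod_cast hm)]
          simp
        · rw [if_neg (by simp [hx]; omega), if_neg (by exact_mod_cast hm)]
          simp
      · have hx' : pvHelix x = false := by simpa using hx
        rw [show (fun y => pvHelix y == pvHelix x) = (fun y => !pvHelix y) from by
          funext y; rw [hx']; simp]
        rw [ih (xs.dropWhile (fun y => !pvHelix y))
          (by have := xs.length_dropWhile_le (fun y => !pvHelix y); simp at h; omega)]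
        rw [if_neg (by simp [hx'])]
        rw [pvGo, if_neg hx, pvGo_nonhelix_run m xs]
        simp

-- ===== VERDICT (by name: the statement is the Claim_ definition above) =====
theorem smooth_ss_spec : Claim_equal_smooth_ss := by
  intro ss m _
  unfold Spec_smooth_ss smooth_ss smooth_ss_alt
  rw [pvOuterA_spec m ss.length ss 0 (by omega)]
  rw [pvB_eq_pvGo m ss.length ss (le_refl _)]
  simp
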